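-- pv_equiv track=rewrite | github.com/sbknana/project-pombal | equipa/bash_security.py | _extract_unquoted
-- ===== SOURCE A (Python) =====
-- def _extract_unquoted(command: str) -> str:
--     """Strip single- and double-quoted content, returning only unquoted text.
--
--     Respects bash quoting rules:
--     - Backslash escapes the next character (outside single quotes).
--     - Single quotes cannot be escaped inside single quotes.
--     - Double quotes do not affect single-quote toggling and vice-versa.
--     """
--     result: list[str] = []
--     in_single = False
--     in_double = False
--     escaped = False
--
--     for ch in command:
--         if escaped:
--             escaped = False
--             if not in_single and not in_double:
--                 result.append(ch)
--             continue
--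
--         if ch == "\\" and not in_single:
--             escaped = True
--             if not in_single and not in_double:
--                 result.append(ch)
--             continue
--
--         if ch == "'" and not in_double:
--             in_single = not in_single
--             continue
--
--         if ch == '"' and not in_single:
--             in_double = not in_double
--             continue
--
--         if not in_single and not in_double:
--             result.append(ch)
--
--     return "".join(result)
-- ===== SOURCE B (Python) =====
-- def _extract_unquoted(command: str) -> str:
--     """Index-driven rewrite: consume whole quoted spans instead of per-char flags."""
--     out = []
--     i = 0
--     n = len(command)
--     while i < n:
--         ch = command[i]
--         if ch == "'":
--             i += 1
--             while i < n and command[i] != "'":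
--                 i += 1
--             i += 1  # step past the closing quote (harmless if unterminated)
--         elif ch == '"':
--             i += 1
--             while i < n:
--                 if command[i] == '"':
--                     i += 1
--                     break
--                 if command[i] == "\\":
--                     i += 2
--                 else:
--                     i += 1
--         elif ch == "\\":
--             out.append(ch)
--             if i + 1 < n:
--                 out.append(command[i + 1])
--             i += 2
--         else:
--             out.append(ch)
--             i += 1
--     return "".join(out)
-- ===== Notes on version B (the rewrite author's own statement) =====
-- stated objective: alternative
-- what changed: Replaced A's per-character state machine (in_single/in_double/escaped flags toggled on every char) by an index-driven scanner that consumes each quoted span in a dedicated inner loop and handles a backslash by emitting two characters at once.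
import Mathlib
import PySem

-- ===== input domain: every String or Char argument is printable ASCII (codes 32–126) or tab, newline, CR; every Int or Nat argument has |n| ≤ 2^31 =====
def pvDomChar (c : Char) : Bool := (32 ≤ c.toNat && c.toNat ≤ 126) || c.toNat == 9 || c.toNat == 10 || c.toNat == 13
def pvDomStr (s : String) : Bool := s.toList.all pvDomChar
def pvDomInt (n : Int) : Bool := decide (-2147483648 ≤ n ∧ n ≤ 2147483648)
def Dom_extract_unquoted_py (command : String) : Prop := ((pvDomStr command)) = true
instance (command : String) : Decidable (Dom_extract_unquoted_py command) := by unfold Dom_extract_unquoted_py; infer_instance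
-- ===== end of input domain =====

-- B replaces A's per-character quote/escape flag machine by an index-driven scanner
-- that consumes whole quoted spans at once (objective: alternative decomposition).


-- ===== PORT A =====
-- state = (result, in_single, in_double, escaped), exactly A's loop body
def aStep (st : List Char × Bool × Bool × Bool) (ch : Char) : List Char × Bool × Bool × Bool :=
  match st with
  | (result, inS, inD, esc) =>
    if esc then
      ((if !inS && !inD then result ++ [ch] else result), inS, inD, false)
    else if ch = '\\' && !inS then
      ((if !inS && !inD then result ++ [ch] else result), inS, inD, true)
    else if ch = '\'' && !inD then
      (result, !inS, inD, esc)
    else if ch = '"' && !inS then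
      (result, inS, !inD, esc)
    else
      ((if !inS && !inD then result ++ [ch] else result), inS, inD, esc)

def extract_unquoted_py (command : String) : String :=
  String.ofList (command.toList.foldl aStep ([], false, false, false)).1

-- ===== PORT B =====
-- inner loop: advance past everything up to and including the next single quote
def skipSingle : List Char → List Char
  | [] => []
  | c :: rest => if c = '\'' then rest else skipSingle rest

-- inner loop: skip to the closing double quote, a backslash skips two characters
def skipDouble : List Char → List Char
  | [] => []
  | c :: rest =>
    if c = '"' then rest
    else if c = '\\' then skipDouble rest.tail   -- i += 2: drop the escaped character too
    else skipDouble rest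
termination_by l => l.length
decreasing_by
  · have : rest.tail.length ≤ rest.length := by cases rest <;> simp
    simp only [List.length_cons]; omega
  · simp

theorem skipSingle_length_le (l : List Char) : (skipSingle l).length ≤ l.length := by
  induction l with
  | nil => simp [skipSingle]
  | cons c rest ih => simp only [skipSingle]; split
                      · simp
                      · simp; omega

theorem skipDouble_length_le_aux : ∀ (n : ℕ) (l : List Char), l.length ≤ n →
    (skipDouble l).length ≤ l.length := by
  intro n
  induction n with
  | zero =>
    intro l h
    have : l = [] := List.length_eq_zero_iff.mp (Nat.le_zero.mp h)
    subst this; simp [skipDouble]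
  | succ n ih =>
    intro l h
    match l with
    | [] => simp [skipDouble]
    | c :: rest =>
      have hr : rest.length ≤ n := by simpa using h
      rw [skipDouble]
      split_ifs with h1 h2
      · simp
      · have ht : rest.tail.length ≤ n := by
          have : rest.tail.length ≤ rest.length := by cases rest <;> simp
          omega
        have := ih rest.tail ht
        have : rest.tail.length ≤ rest.length := by cases rest <;> simp
        simp; omega
      · have := ih rest hr
        simp; omega

theorem skipDouble_length_le (l : List Char) : (skipDouble l).length ≤ l.length :=
  skipDouble_length_le_aux l.length l le_rfl

-- the outer while loop over the remaining suffix
def bGo : List Char → List Char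
  | [] => []
  | c :: rest =>
    if c = '\'' then bGo (skipSingle rest)
    else if c = '"' then bGo (skipDouble rest)
    else if c = '\\' then c :: (rest.take 1 ++ bGo rest.tail)   -- emit '\\' and the next char if any; i += 2
    else c :: bGo rest
termination_by l => l.length
decreasing_by
  · have := skipSingle_length_le rest; simp only [List.length_cons]; omega
  · have := skipDouble_length_le rest; simp only [List.length_cons]; omega
  · have : rest.tail.length ≤ rest.length := by cases rest <;> simp
    simp only [List.length_cons]; omega
  · simp

def extract_unquoted_py_alt (command : String) : String :=
  String.ofList (bGo command.toList)

-- ===== PRECONDITION & SPEC =====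
def Spec_extract_unquoted_py (command : String) (out : String) : Prop := out = extract_unquoted_py_alt command
instance (command : String) (out : String) : Decidable (Spec_extract_unquoted_py command out) := by unfold Spec_extract_unquoted_py; infer_instance

-- ===== CLAIM (what is proved, stated in full; the proofs are below) =====
def Claim_equal_extract_unquoted_py : Prop := ∀ (command : String), Dom_extract_unquoted_py command → Spec_extract_unquoted_py command (extract_unquoted_py command)

-- ===== LEMMAS AND PROOFS =====

-- the accumulated result is only ever appended to on the right
theorem aStep_acc (acc : List Char) (s d e : Bool) (c : Char) :
    aStep (acc, s, d, e) c =
      (acc ++ (aStep ([], s, d, e) c).1, (aStep ([], s, d, e) c).2) := by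
  simp only [aStep]; split_ifs <;> simp

theorem foldl_aStep_acc (l : List Char) :
    ∀ (acc : List Char) (s d e : Bool),
      (List.foldl aStep (acc, s, d, e) l).1
        = acc ++ (List.foldl aStep (([] : List Char), s, d, e) l).1 := by
  induction l with
  | nil => intro acc s d e; simp
  | cons c rest ih =>
    intro acc s d e
    simp only [List.foldl_cons]
    rw [aStep_acc acc s d e c]
    rcases h : aStep ([], s, d, e) c with ⟨w, s', d', e'⟩
    simp only
    rw [ih (acc ++ w) s' d' e', ih w s' d' e', List.append_assoc]

-- A's fold from a given flag state, result component only
def fE (s d e : Bool) (l : List Char) : List Char :=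
  (List.foldl aStep (([] : List Char), s, d, e) l).1

theorem fE_cons (s d e : Bool) (c : Char) (l : List Char) :
    fE s d e (c :: l)
      = (aStep ([], s, d, e) c).1
          ++ fE (aStep ([], s, d, e) c).2.1 (aStep ([], s, d, e) c).2.2.1
               (aStep ([], s, d, e) c).2.2.2 l := by
  unfold fE
  simp only [List.foldl_cons]
  rcases h : aStep ([], s, d, e) c with ⟨w, s', d', e'⟩
  simp only
  exact foldl_aStep_acc l w s' d' e'

-- the core simulation: A's flag states correspond to B's scanner positions
theorem fE_nil (s d e : Bool) : fE s d e [] = [] := by simp [fE]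

theorem fE_n_squote (rest : List Char) :
    fE false false false ('\'' :: rest) = fE true false false rest := by
  rw [fE_cons]; simp [aStep]

theorem fE_n_dquote (rest : List Char) :
    fE false false false ('"' :: rest) = fE false true false rest := by
  rw [fE_cons]; simp [aStep]

theorem fE_n_bslash (rest : List Char) :
    fE false false false ('\\' :: rest) = '\\' :: fE false false true rest := by
  rw [fE_cons]; simp [aStep]

theorem fE_n_other (c : Char) (rest : List Char)
    (h1 : c ≠ '\'') (h2 : c ≠ '"') (h3 : c ≠ '\\') :
    fE false false false (c :: rest) = c :: fE false false false rest := by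
  rw [fE_cons]; simp [aStep, h1, h2, h3]

theorem fE_esc_n (c : Char) (rest : List Char) :
    fE false false true (c :: rest) = c :: fE false false false rest := by
  rw [fE_cons]; simp [aStep]

theorem fE_s_quote (rest : List Char) :
    fE true false false ('\'' :: rest) = fE false false false rest := by
  rw [fE_cons]; simp [aStep]

theorem fE_s_other (c : Char) (rest : List Char) (h1 : c ≠ '\'') :
    fE true false false (c :: rest) = fE true false false rest := by
  rw [fE_cons]; simp [aStep, h1]

theorem fE_d_dquote (rest : List Char) :
    fE false true false ('"' :: rest) = fE false false false rest := by
  rw [fE_cons]; simp [aStep]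

theorem fE_d_bslash (rest : List Char) :
    fE false true false ('\\' :: rest) = fE false true true rest := by
  rw [fE_cons]; simp [aStep]

theorem fE_d_other (c : Char) (rest : List Char) (h2 : c ≠ '"') (h3 : c ≠ '\\') :
    fE false true false (c :: rest) = fE false true false rest := by
  rw [fE_cons]; simp [aStep, h2, h3]

theorem fE_esc_d (c : Char) (rest : List Char) :
    fE false true true (c :: rest) = fE false true false rest := by
  rw [fE_cons]; simp [aStep]

theorem fE_eq_bGo : ∀ (n : ℕ) (l : List Char), l.length ≤ n →
    (fE false false false l = bGo l ∧
     fE true false false l = bGo (skipSingle l) ∧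
     fE false true false l = bGo (skipDouble l)) := by
  intro n
  induction n with
  | zero =>
    intro l h
    have : l = [] := List.length_eq_zero_iff.mp (Nat.le_zero.mp h)
    subst this
    simp [fE, bGo, skipSingle, skipDouble]
  | succ n ih =>
    intro l h
    match l with
    | [] => simp [fE, bGo, skipSingle, skipDouble]
    | c :: rest =>
      have hr : rest.length ≤ n := by simpa using h
      refine ⟨?_, ?_, ?_⟩
      · -- normal state
        by_cases h1 : c = '\''
        · subst h1
          rw [fE_n_squote, (ih rest hr).2.1, bGo]
          simp
        · by_cases h2 : c = '"'
          · subst h2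
            rw [fE_n_dquote, (ih rest hr).2.2, bGo]
            simp
          · by_cases h3 : c = '\\'
            · subst h3
              rw [fE_n_bslash]
              match rest with
              | [] => simp [fE_nil, bGo]
              | d :: rest' =>
                have hr' : rest'.length ≤ n := by simp at hr; omega
                rw [fE_esc_n, (ih rest' hr').1, bGo]
                simp
            · rw [fE_n_other c rest h1 h2 h3, (ih rest hr).1, bGo]
              simp [h1, h2, h3]
      · -- inside single quotes
        by_cases h1 : c = '\''
        · subst h1
          rw [fE_s_quote, (ih rest hr).1, skipSingle]
          simp
        · rw [fE_s_other c rest h1, (ih rest hr).2.1, skipSingle]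
          simp [h1]
      · -- inside double quotes
        by_cases h2 : c = '"'
        · subst h2
          rw [fE_d_dquote, (ih rest hr).1, skipDouble]
          simp
        · by_cases h3 : c = '\\'
          · subst h3
            rw [fE_d_bslash]
            match rest with
            | [] => simp [fE_nil, skipDouble, bGo]
            | d :: rest' =>
              have hr' : rest'.length ≤ n := by simp at hr; omega
              rw [fE_esc_d, (ih rest' hr').2.2, skipDouble]
              simp
          · rw [fE_d_other c rest h2 h3, (ih rest hr).2.2, skipDouble]
            simp [h2, h3]

-- ===== VERDICT (by name: the statement is the Claim_ definition above) =====
theorem extract_unquoted_py_spec : Claim_equal_extract_unquoted_py := by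
  intro command _
  unfold Spec_extract_unquoted_py extract_unquoted_py extract_unquoted_py_alt
  have := (fE_eq_bGo command.toList.length command.toList le_rfl).1
  unfold fE at this
  rw [this]
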